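-- pv_equiv track=rewrite | github.com/aaryanbhujang/android-automation | src/adb_wrapper.py | _escape_text_for_input
-- ===== SOURCE A (Python) =====
-- def _escape_text_for_input(text: str) -> str:
--     # Basic escaping for adb shell input text
--     escaped = []
--     for ch in text:
--         if ch == " ":
--             escaped.append("%s")
--         elif ch in ["&", "<", ">", "(", ")", "|", ";", "'", "\"", "\\", "$", "`"]:
--             escaped.append(" ")
--         else:
--             escaped.append(ch)
--     return "".join(escaped)
-- ===== SOURCE B (Python) =====
-- def _escape_text_for_input(text: str) -> str:
--     # Basic escaping for adb shell input text: spaces become "%s" via split/join,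
--     # then each shell metacharacter is blanked by a whole-string replace pass.
--     out = "%s".join(text.split(" "))
--     for m in "&<>()|;'\"\\$`":
--         out = out.replace(m, " ")
--     return out
-- ===== Notes on version B (the rewrite author's own statement) =====
-- stated objective: alternative
-- what changed: Replaces A's single per-character loop with its if/elif/else branch chain and list accumulator by staged whole-string passes: split on the space character joined with the percent-s token, then a chain of whole-string replace passes, one per metacharacter; the passes run in C-level str builtins instead of a Python-level loop.
import Mathlib
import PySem

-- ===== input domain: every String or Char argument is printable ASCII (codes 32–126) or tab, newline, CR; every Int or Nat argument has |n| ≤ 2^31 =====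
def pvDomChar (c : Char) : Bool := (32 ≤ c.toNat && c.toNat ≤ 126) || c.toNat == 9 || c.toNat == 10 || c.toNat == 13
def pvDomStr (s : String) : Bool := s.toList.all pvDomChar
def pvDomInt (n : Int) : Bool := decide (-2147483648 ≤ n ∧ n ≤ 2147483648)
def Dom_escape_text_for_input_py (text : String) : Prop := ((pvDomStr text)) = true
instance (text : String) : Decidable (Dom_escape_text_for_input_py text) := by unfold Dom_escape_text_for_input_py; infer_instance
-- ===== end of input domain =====

-- B escapes in staged whole-string passes — split-on-space joined with "%s", then a
-- chain of replace(metachar, " ") passes — instead of A's per-character branch loop (alternative).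


-- ===== PORT A =====
-- loop over the chars, appending "%s" / " " / the char itself to a list, then "".join
def escape_text_for_input_py (text : String) : String :=
  let escaped : List String := text.toList.foldl (fun acc ch =>
    if ch = ' ' then acc ++ ["%s"]
    else if ch ∈ ['&', '<', '>', '(', ')', '|', ';', '\'', '"', '\\', '$', '`'] then acc ++ [" "]
    else acc ++ [ch.toString]) []
  PySem.Str.join "" escaped

-- ===== PORT B =====
-- out = "%s".join(text.split(" ")); then for each metacharacter m, out = out.replace(m, " ")
-- (split? returns some for the non-empty separator " "; getD [] only discharges the option)
def escape_text_for_input_py_alt (text : String) : String :=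
  let out := PySem.Str.join "%s" ((PySem.Str.split? text " ").getD [])
  ("&<>()|;'\"\\$`".toList).foldl (fun s m => PySem.Str.replace s (String.ofList [m]) " ") out

-- ===== PRECONDITION & SPEC =====
def Spec_escape_text_for_input_py (text : String) (out : String) : Prop := out = escape_text_for_input_py_alt text
instance (text : String) (out : String) : Decidable (Spec_escape_text_for_input_py text out) := by unfold Spec_escape_text_for_input_py; infer_instance

-- ===== CLAIM (what is proved, stated in full; the proofs are below) =====
def Claim_equal_escape_text_for_input_py : Prop := ∀ (text : String), Dom_escape_text_for_input_py text → Spec_escape_text_for_input_py text (escape_text_for_input_py text)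

-- ===== LEMMAS AND PROOFS =====

-- A's branch chain as a per-character function
def pvEscA (ch : Char) : String :=
  if ch = ' ' then "%s"
  else if ch ∈ ['&', '<', '>', '(', ')', '|', ';', '\'', '"', '\\', '$', '`'] then " "
  else ch.toString

lemma pvFoldl_map (l : List Char) (acc : List String) :
    l.foldl (fun acc ch =>
      if ch = ' ' then acc ++ ["%s"]
      else if ch ∈ ['&', '<', '>', '(', ')', '|', ';', '\'', '"', '\\', '$', '`'] then acc ++ [" "]
      else acc ++ [ch.toString]) acc = acc ++ l.map pvEscA := by
  induction l generalizing acc with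
  | nil => simp
  | cons c t ih =>
    simp only [List.foldl_cons, List.map_cons, ih, pvEscA]
    split_ifs <;> simp

-- "".join is concatenation
lemma pvJoin_nil_sep (xss : List (List Char)) : PySem.Chars.join [] xss = xss.flatten := by
  induction xss with
  | nil => simp [PySem.Chars.join_nil]
  | cons p rest ih =>
    cases rest with
    | nil => simp [PySem.Chars.join, List.intercalate]
    | cons q r =>
      rw [PySem.Chars.join_cons_cons]
      simp [ih]

def pvSub (m : Char) (r : List Char) (c : Char) : List Char := if c = m then r else [c]

lemma pvReplace_go (m : Char) (r : List Char) (l : List Char) : ∀ (fuel : Nat) (acc : List Char),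
    l.length ≤ fuel → PySem.Chars.replace.go [m] r fuel l acc = acc.reverse ++ l.flatMap (pvSub m r) := by
  induction l with
  | nil => intro fuel acc _; cases fuel <;> simp [PySem.Chars.replace.go]
  | cons c t ih =>
    intro fuel acc h
    cases fuel with
    | zero => simp at h
    | succ f =>
      rw [PySem.Chars.replace.go]
      by_cases hc : c = m
      · simp [hc, List.isPrefixOf, pvSub, ih f _ (by simpa using h)]
      · simp [List.isPrefixOf, hc, Ne.symm hc, pvSub, ih f _ (by simpa using h)]

lemma pvReplace_char (m : Char) (r : List Char) (s : List Char) :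
    PySem.Chars.replace s [m] r = s.flatMap (pvSub m r) := by
  rw [PySem.Chars.replace]
  simp [pvReplace_go m r s s.length [] le_rfl]

def pvSplitP (m : Char) : List Char → List Char → List (List Char)
  | [], cur => [cur.reverse]
  | c :: t, cur => if c = m then cur.reverse :: pvSplitP m t [] else pvSplitP m t (c :: cur)

lemma pvSplitP_ne_nil (m : Char) (l cur : List Char) : pvSplitP m l cur ≠ [] := by
  induction l generalizing cur with
  | nil => simp [pvSplitP]
  | cons c t ih => simp only [pvSplitP]; split_ifs <;> simp [ih]

lemma pvSplitOn_go (m : Char) (l : List Char) : ∀ (fuel : Nat) (cur : List Char) (acc : List (List Char)),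
    l.length < fuel → PySem.Chars.splitOn.go [m] fuel l cur acc = acc.reverse ++ pvSplitP m l cur := by
  induction l with
  | nil =>
    intro fuel cur acc h
    cases fuel with
    | zero => omega
    | succ f => simp [PySem.Chars.splitOn.go, pvSplitP]
  | cons c t ih =>
    intro fuel cur acc h
    cases fuel with
    | zero => omega
    | succ f =>
      rw [PySem.Chars.splitOn.go]
      by_cases hc : c = m
      · simp [hc, List.isPrefixOf, pvSplitP, ih f _ _ (by simpa using h)]
      · simp [List.isPrefixOf, hc, Ne.symm hc, pvSplitP, ih f _ _ (by simpa using h)]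

lemma pvSplitOn_char (m : Char) (s : List Char) :
    PySem.Chars.splitOn s [m] = pvSplitP m s [] := by
  rw [PySem.Chars.splitOn]
  simp [pvSplitOn_go m s (s.length + 1) [] [] (by omega)]

lemma pvJoin_splitP (m : Char) (r : List Char) (l cur : List Char) :
    PySem.Chars.join r (pvSplitP m l cur) = cur.reverse ++ l.flatMap (pvSub m r) := by
  induction l generalizing cur with
  | nil => simp [pvSplitP, PySem.Chars.join_singleton]
  | cons c t ih =>
    simp only [pvSplitP]
    by_cases hc : c = m
    · obtain ⟨p, ps, hps⟩ := List.exists_cons_of_ne_nil (pvSplitP_ne_nil m t [])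
      rw [if_pos hc, hps, PySem.Chars.join_cons_cons, ← hps, ih]
      simp [pvSub, hc]
    · simp [hc, ih, pvSub]


-- the chain of single-char replaces, per character
def pvChain : List Char → Char → List Char
  | [], c => [c]
  | m :: M, c => (pvSub m [' '] c).flatMap (pvChain M)

lemma pvFoldRepl (M : List Char) (s : List Char) :
    M.foldl (fun cs m => PySem.Chars.replace cs [m] [' ']) s = s.flatMap (pvChain M) := by
  induction M generalizing s with
  | nil => simp [pvChain]
  | cons m M ih =>
    rw [List.foldl_cons, pvReplace_char, ih, List.flatMap_assoc]
    rfl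

-- B's foldl of Str.replace, seen on the char lists
lemma pvFoldRepl_str (M : List Char) (s : String) :
    (M.foldl (fun s m => PySem.Str.replace s (String.ofList [m]) " ") s).toList =
      M.foldl (fun cs m => PySem.Chars.replace cs [m] [' ']) s.toList := by
  induction M generalizing s with
  | nil => rfl
  | cons m M ih => simp [List.foldl_cons, ih, PySem.Str.toList_replace]

-- the composed per-character action of B equals A's branch chain
lemma pvChain_esc (c : Char) :
    (pvSub ' ' ['%', 's'] c).flatMap (pvChain ("&<>()|;'\"\\$`".toList)) = (pvEscA c).toList := by
  by_cases h : c ∈ [' ', '&', '<', '>', '(', ')', '|', ';', '\'', '"', '\\', '$', '`']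
  · fin_cases h <;> decide
  · simp only [List.mem_cons, List.not_mem_nil, or_false, not_or] at h
    obtain ⟨h0, h1, h2, h3, h4, h5, h6, h7, h8, h9, h10, h11, h12⟩ := h
    simp [pvSub, pvChain, pvEscA, h0, h1, h2, h3, h4, h5, h6, h7, h8, h9, h10, h11, h12,
      Char.toString]

-- ===== VERDICT (by name: the statement is the Claim_ definition above) =====
theorem escape_text_for_input_py_spec : Claim_equal_escape_text_for_input_py := by
  intro text _
  unfold Spec_escape_text_for_input_py
  apply String.toList_injective        -- compare the two strings by their character lists
  show (escape_text_for_input_py text).toList = (escape_text_for_input_py_alt text).toList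
  unfold escape_text_for_input_py escape_text_for_input_py_alt
  rw [pvFoldl_map]
  simp only [List.nil_append, PySem.Str.toList_join, List.map_map,
    PySem.Str.split?, pvFoldRepl_str, pvFoldRepl]
  rw [show ("".toList : List Char) = [] from rfl, pvJoin_nil_sep,
    show (" ".toList : List Char) = [' '] from rfl,
    show PySem.Chars.split? text.toList [' '] = some (PySem.Chars.splitOn text.toList [' ']) from rfl]
  simp only [Option.map_some, Option.getD_some, List.map_map, Function.comp_def,
    String.toList_ofList, List.map_id_fun', id_eq]
  rw [pvSplitOn_char, pvJoin_splitP]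
  simp only [List.reverse_nil, List.nil_append, List.flatMap_assoc,
    show ("%s".toList : List Char) = ['%', 's'] from rfl, pvChain_esc]
  simp [List.flatMap_def]
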